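-- pv_equiv track=rewrite | github.com/agustincomolli/Python | Soy Dalto/20-funciones.py | create_password
-- ===== SOURCE A (Python) =====
-- def create_password(number: int):
--     # Crear una lista con las letras del alfabeto.
--     letters = [chr(char_number) for char_number in range(97, 123)]
--     # Tomar el primer número del argumento.
--     number = str(number)
--     number = int(number[0])
--     # Generar los índices para crear las contraseñas.
--     index_1 = number - 2
--     index_2 = number
--     index_3 = number - 5
--     # Crear la contraseña con los índices generados.
--     password = f"{letters[index_1]}{letters[index_2]}{letters[index_3]}{number**3}"
--
--     return password
-- ===== SOURCE B (Python) =====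
-- # The password depends only on the first digit of `number`, so there are
-- # exactly ten possible outputs: precompute them all in a lookup table and
-- # do a single dict lookup per call (no alphabet list, no index arithmetic,
-- # no exponentiation at call time).
-- _PASSWORDS = {
--     "0": "yav0",
--     "1": "zbw1",
--     "2": "acx8",
--     "3": "bdy27",
--     "4": "cez64",
--     "5": "dfa125",
--     "6": "egb216",
--     "7": "fhc343",
--     "8": "gid512",
--     "9": "hje729",
-- }
--
--
-- def create_password(number: int):
--     return _PASSWORDS[str(number)[0]]
-- ===== Notes on version B (the rewrite author's own statement) =====
-- stated objective: alternative
-- what changed: B replaces A's whole computation (building a 26-letter alphabet list, three list index lookups, cubing the digit, f-string formatting) by a single lookup in a precomputed ten-entry table keyed by the first digit character, since the function has only ten possible outputs.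
import Mathlib
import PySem

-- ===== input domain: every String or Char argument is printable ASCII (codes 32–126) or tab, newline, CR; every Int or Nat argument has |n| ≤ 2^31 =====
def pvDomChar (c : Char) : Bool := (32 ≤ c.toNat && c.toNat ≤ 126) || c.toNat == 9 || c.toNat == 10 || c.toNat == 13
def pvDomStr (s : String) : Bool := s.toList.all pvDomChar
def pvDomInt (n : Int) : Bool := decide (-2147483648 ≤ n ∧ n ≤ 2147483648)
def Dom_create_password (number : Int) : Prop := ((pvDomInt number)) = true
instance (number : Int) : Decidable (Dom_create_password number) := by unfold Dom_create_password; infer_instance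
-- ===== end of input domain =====

-- B replaces A's computation by one lookup in a precomputed ten-entry table (only ten outputs exist).

-- ===== PORT A =====
def create_password (number : Int) : String :=
  -- letters = [chr(c) for c in range(97, 123)]
  let letters : List Char := (PySem.List.pyRange 97 123 1).map (fun c => Char.ofNat c.toNat)
  -- number = int(str(number)[0])   (int('-') raises ValueError → excluded by Pre_)
  match PySem.Str.pyGet? (PySem.Int.toStr number) 0 with
  | none => ""                    -- unreachable: str(number) is never empty
  | some c =>
    match PySem.Int.ofChars? [c] with
    | none => ""                  -- ValueError, excluded by Pre_
    | some n =>
      -- f"{letters[n-2]}{letters[n]}{letters[n-5]}{n**3}"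
      match PySem.List.pyGet? letters (n - 2), PySem.List.pyGet? letters n,
            PySem.List.pyGet? letters (n - 5) with
      | some l1, some l2, some l3 =>
          String.ofList [l1, l2, l3] ++ PySem.Int.toStr (n ^ 3)
      | _, _, _ => ""             -- IndexError, never hit under Pre_

-- ===== PORT B =====
-- _PASSWORDS: the precomputed ten-entry table, keyed by first digit character
def pvPasswordTable : PySem.Dict Char String := PySem.Dict.ofList
  [('0', "yav0"), ('1', "zbw1"), ('2', "acx8"), ('3', "bdy27"), ('4', "cez64"),
   ('5', "dfa125"), ('6', "egb216"), ('7', "fhc343"), ('8', "gid512"), ('9', "hje729")]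

def create_password_alt (number : Int) : String :=
  -- return _PASSWORDS[str(number)[0]]
  match PySem.Str.pyGet? (PySem.Int.toStr number) 0 with
  | none => ""                    -- unreachable: str(number) is never empty
  | some c =>
    match PySem.Dict.get? pvPasswordTable c with
    | none => ""                  -- KeyError, excluded by Pre_
    | some pw => pw

-- ===== PRECONDITION & SPEC =====
-- Python A raises ValueError on negative numbers (int('-') on the sign character); B raises KeyError there too.
def Pre_create_password (number : Int) : Prop := 0 ≤ number
instance (number : Int) : Decidable (Pre_create_password number) := by unfold Pre_create_password; infer_instance
def pvWitness_create_password : Int := (7)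
def Spec_create_password (number : Int) (out : String) : Prop := out = create_password_alt number
instance (number : Int) (out : String) : Decidable (Spec_create_password number out) := by unfold Spec_create_password; infer_instance

-- ===== CLAIM =====
def Claim_equal_create_password : Prop := ∀ (number : Int), Dom_create_password number → Pre_create_password number → Spec_create_password number (create_password number)

-- ===== LEMMAS AND PROOFS =====

-- Head of Nat.toDigitsCore (base 10) is always a digit character.
lemma toDigitsCore_head (f : Nat) : ∀ (n : Nat) (l : List Char),
    ∃ k t, k < 10 ∧ Nat.toDigitsCore 10 (f + 1) n l = Nat.digitChar k :: t := by
  induction f with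
  | zero =>
    intro n l
    exact ⟨n % 10, l, Nat.mod_lt _ (by norm_num), by simp [Nat.toDigitsCore]⟩
  | succ f ih =>
    intro n l
    simp only [Nat.toDigitsCore]
    split
    · exact ⟨n % 10, l, Nat.mod_lt _ (by norm_num), rfl⟩
    · exact ih (n / 10) (Nat.digitChar (n % 10) :: l)

-- After extracting the first (digit) character, the two tails agree for every digit.
lemma tails_eq (k : Nat) (hk : k < 10) :
    (match PySem.Int.ofChars? [Nat.digitChar k] with
      | none => ""
      | some n =>
        match PySem.List.pyGet? ((PySem.List.pyRange 97 123 1).map (fun c => Char.ofNat c.toNat)) (n - 2),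
              PySem.List.pyGet? ((PySem.List.pyRange 97 123 1).map (fun c => Char.ofNat c.toNat)) n,
              PySem.List.pyGet? ((PySem.List.pyRange 97 123 1).map (fun c => Char.ofNat c.toNat)) (n - 5) with
        | some l1, some l2, some l3 =>
            String.ofList [l1, l2, l3] ++ PySem.Int.toStr (n ^ 3)
        | _, _, _ => "") =
    (match PySem.Dict.get? pvPasswordTable (Nat.digitChar k) with
      | none => ""
      | some pw => pw) := by
  interval_cases k <;> decide

theorem create_password_equal (number : Int) (hpre : 0 ≤ number) :
    create_password number = create_password_alt number := by
  obtain ⟨k, t, hk, hdig⟩ := toDigitsCore_head number.toNat number.toNat []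
  have hstr : (PySem.Int.toStr number).toList = Nat.digitChar k :: t := by
    rw [PySem.Int.toList_toStr]
    simp only [PySem.Int.toChars, if_neg (by omega : ¬ number < 0)]
    simpa [Nat.toDigits] using hdig
  have hget : PySem.Str.pyGet? (PySem.Int.toStr number) 0 = some (Nat.digitChar k) := by
    simp [PySem.Str.pyGet?, hstr, PySem.Chars.pyGet?, PySem.List.pyGet?, PySem.List.pyIdx?]
  unfold create_password create_password_alt
  simp only [hget]
  exact tails_eq k hk

-- ===== VERDICT =====
theorem create_password_spec : Claim_equal_create_password := by
  intro number _ hpre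
  exact create_password_equal number hpre
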